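-- pv_equiv track=rewrite | github.com/Yeransian/TreeHouse-Project1 | league_builder.py | assign_players
-- ===== SOURCE A (Python) =====
-- def sort_players(players):
--     inexperienced = []
--     experienced = []
--     for player in players:                       # loop through players
--         if player['Soccer Experience'] == "NO":  # assign group
--             inexperienced.append(player)
--         else:
--             experienced.append(player)
--     return inexperienced, experienced
--
-- def assign_players(players, team_list):        # assign players to teams.4
--     index = 0
--     sorted_players = sort_players(players)
--     player_list = []                           # Hold the players in a list
--     teams = []
--     for key, value in team_list.items():       # break team dictionary into a list
--         teams.append(key)
--     for group in sorted_players:               # loop through the 2 player groups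
--         range = len(teams) - 1                 # set range = to the number of teams, use this   # value to select a team based on its current index
--         for player in group:                   # loop through players in this group
--             player['Team'] = teams[index]      # assign player to the current team (index value)
--             player_list.append(player)         # add the updated player to a clean list
--             if index < range:                  # if index is less than the number of teams,
--                 index += 1                     # increment by one..
--             else:
--                 index = 0                      # otherwise reset the index
--     return player_list                         # return an updated list of players with their team assignments
-- ===== SOURCE B (Python) =====
-- def assign_players(players, team_list):
--     # Same in-place mutation as A (each player dict gets a 'Team' key); return value equivalence.
--     teams = list(team_list)
--     order = []
--     boundary = 0                       # players before this index are the inexperienced ones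
--     for player in players:
--         if player['Soccer Experience'] == 'NO':
--             order.insert(boundary, player)
--             boundary += 1
--         else:
--             order.append(player)
--     if order:
--         copies = -(-len(order) // len(teams))          # ceiling division
--         for player, team in zip(order, teams * copies):
--             player['Team'] = team
--     return order
-- ===== Notes on version B (the rewrite author's own statement) =====
-- stated objective: alternative
-- what changed: Replaces the sort_players helper plus the nested two-group loop with its manually wrapped counter by one boundary-insertion pass that orders the players, followed by a zip of that order with the team-name list replicated ceil(n/t) times.
import Mathlib
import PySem

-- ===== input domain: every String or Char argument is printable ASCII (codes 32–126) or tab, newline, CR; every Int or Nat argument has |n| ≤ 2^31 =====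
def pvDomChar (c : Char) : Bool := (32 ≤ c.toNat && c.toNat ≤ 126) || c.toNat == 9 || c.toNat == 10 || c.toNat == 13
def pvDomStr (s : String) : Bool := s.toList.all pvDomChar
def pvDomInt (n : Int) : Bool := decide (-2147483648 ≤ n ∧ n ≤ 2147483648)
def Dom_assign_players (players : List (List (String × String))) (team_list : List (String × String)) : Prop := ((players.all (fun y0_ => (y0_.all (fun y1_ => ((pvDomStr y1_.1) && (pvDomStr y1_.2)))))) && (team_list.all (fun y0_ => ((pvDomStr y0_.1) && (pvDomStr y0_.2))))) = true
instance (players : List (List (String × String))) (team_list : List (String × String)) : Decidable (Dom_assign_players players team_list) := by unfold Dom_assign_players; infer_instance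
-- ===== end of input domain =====

-- B drops the sort_players helper and A's two-group nested loop with its wrapping counter:
-- it orders the players in ONE pass by inserting each inexperienced player at a moving
-- boundary index, then assigns teams by zipping with the team list replicated ceil(n/t) times.
-- Both A and B mutate each player dict in place the same way; equivalence is about the return value.

-- ===== PORT A =====
-- sort_players: one loop appending to two accumulators
def pvSortPlayers (players : List (List (String × String))) :
    List (List (String × String)) × List (List (String × String)) :=
  players.foldl (fun acc player =>
    if PySem.Dict.get? (PySem.Dict.mk player) "Soccer Experience" == some "NO" then
      (acc.1 ++ [player], acc.2)
    else
      (acc.1, acc.2 ++ [player])) ([], [])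

-- body of A's inner loop: player['Team'] = teams[index]; append; increment-or-reset index
def pvAStep (teams : List String) (st : Int × List (List (String × String)))
    (player : List (String × String)) : Int × List (List (String × String)) :=
  let p' := (PySem.Dict.insert (PySem.Dict.mk player) "Team"
      ((PySem.List.pyGet? teams st.1).getD "")).items   -- teams[index]: none (IndexError) is outside Pre_
  (if st.1 < (teams.length : Int) - 1 then st.1 + 1 else 0, st.2 ++ [p'])

def assign_players (players : List (List (String × String))) (team_list : List (String × String)) : List (List (String × String)) :=
  let sorted_players := pvSortPlayers players
  let teams := (PySem.Dict.mk team_list).items.foldl (fun acc kv => acc ++ [kv.1]) []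
  let st1 := sorted_players.1.foldl (pvAStep teams) (0, [])
  let st2 := sorted_players.2.foldl (pvAStep teams) st1
  st2.2

-- ===== PORT B =====
-- ordering pass: order.insert(boundary, player) / order.append(player)
def pvBStep (st : List (List (String × String)) × Int) (player : List (String × String)) :
    List (List (String × String)) × Int :=
  if PySem.Dict.get? (PySem.Dict.mk player) "Soccer Experience" == some "NO" then
    (PySem.List.insert st.1 st.2 player, st.2 + 1)
  else
    (st.1 ++ [player], st.2)

-- player['Team'] = team for one (player, team) pair of the zip
def pvTag (pt : List (String × String) × String) : List (String × String) :=
  (PySem.Dict.insert (PySem.Dict.mk pt.1) "Team" pt.2).items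

def assign_players_alt (players : List (List (String × String))) (team_list : List (String × String)) : List (List (String × String)) :=
  let teams := PySem.Dict.keys (PySem.Dict.mk team_list)   -- list(team_list)
  let st := players.foldl pvBStep ([], 0)
  if st.1.isEmpty then st.1
  else
    -- copies = -(-len(order) // len(teams)); teams.length = 0 (ZeroDivisionError) is outside Pre_
    let copies : Int := -(PySem.Int.floordiv (-(st.1.length : Int)) (teams.length : Int))
    (st.1.zip (PySem.List.pyRepeat teams copies)).map pvTag

-- ===== PRECONDITION & SPEC =====
-- Pre_ excludes exactly the inputs where A raises: a player without the 'Soccer Experience'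
-- key (KeyError) and a non-empty players list with an empty team_list (IndexError at teams[0]).
def Pre_assign_players (players : List (List (String × String))) (team_list : List (String × String)) : Prop :=
  (players.all (fun p => (PySem.Dict.mk p).contains "Soccer Experience")) = true ∧
  (players = [] ∨ team_list ≠ [])

instance (players : List (List (String × String))) (team_list : List (String × String)) : Decidable (Pre_assign_players players team_list) := by
  unfold Pre_assign_players; infer_instance

def pvWitness_assign_players : (List (List (String × String))) × (List (String × String)) :=
  ([[("Name", "Al"), ("Soccer Experience", "NO")],
    [("Name", "Bo"), ("Soccer Experience", "YES")],
    [("Name", "Cy"), ("Soccer Experience", "NO")]],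
   [("Dragons", "d"), ("Sharks", "s")])

def Spec_assign_players (players : List (List (String × String))) (team_list : List (String × String)) (out : List (List (String × String))) : Prop := out = assign_players_alt players team_list

instance (players : List (List (String × String))) (team_list : List (String × String)) (out : List (List (String × String))) : Decidable (Spec_assign_players players team_list out) := by
  unfold Spec_assign_players; infer_instance

-- ===== CLAIM =====
def Claim_equal_assign_players : Prop := ∀ (players : List (List (String × String))) (team_list : List (String × String)), Dom_assign_players players team_list → Pre_assign_players players team_list → Spec_assign_players players team_list (assign_players players team_list)

-- ===== LEMMAS AND PROOFS =====

def pvIsNo (player : List (String × String)) : Bool :=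
  PySem.Dict.get? (PySem.Dict.mk player) "Soccer Experience" == some "NO"

-- "player at running position i gets team i % len(teams)" — the common abstraction of both loops
def pvIns (teams : List String) (i : Nat) (player : List (String × String)) :
    List (String × String) :=
  (PySem.Dict.insert (PySem.Dict.mk player) "Team"
    ((teams[i % teams.length]?).getD "")).items

def pvBuild (teams : List String) : Nat → List (List (String × String)) → List (List (String × String))
  | _, [] => []
  | i, p :: ps => pvIns teams i p :: pvBuild teams (i + 1) ps

theorem pvBuild_congr (teams : List String) (g : List (List (String × String)))
    (i j : Nat) (h : i % teams.length = j % teams.length) :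
    pvBuild teams i g = pvBuild teams j g := by
  induction g generalizing i j with
  | nil => rfl
  | cons p ps ih =>
      have h2 : (i + 1) % teams.length = (j + 1) % teams.length := by
        rw [Nat.add_mod, h, ← Nat.add_mod]
      simp only [pvBuild, pvIns, h, ih _ _ h2]

theorem pvBuild_append (teams : List String) (g h : List (List (String × String))) (i : Nat) :
    pvBuild teams i (g ++ h) = pvBuild teams i g ++ pvBuild teams (i + g.length) h := by
  induction g generalizing i with
  | nil => simp [pvBuild]
  | cons p ps ih => simp [pvBuild, ih, Nat.add_comm, Nat.add_left_comm]

theorem pvBuild_length (teams : List String) (g : List (List (String × String))) (i : Nat) :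
    (pvBuild teams i g).length = g.length := by
  induction g generalizing i with
  | nil => rfl
  | cons p ps ih => simp [pvBuild, ih]

theorem pvBuild_getElem (teams : List String) (g : List (List (String × String))) (i k : Nat)
    (hk : k < g.length) :
    (pvBuild teams i g)[k]'(by rw [pvBuild_length]; exact hk) = pvIns teams (i + k) g[k] := by
  induction g generalizing i k with
  | nil => simp at hk
  | cons p ps ih =>
      cases k with
      | zero => simp [pvBuild]
      | succ m =>
          have := ih (i + 1) m (by simpa using Nat.lt_of_succ_lt_succ hk)
          simpa [pvBuild, Nat.add_assoc, Nat.add_comm 1 m] using this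

-- === A side ===
theorem pvSortPlayers_eq (players : List (List (String × String))) :
    pvSortPlayers players = (players.filter pvIsNo, players.filter (fun p => !(pvIsNo p))) := by
  suffices h : ∀ (ps a b : List (List (String × String))),
      ps.foldl (fun acc player =>
        if pvIsNo player then (acc.1 ++ [player], acc.2) else (acc.1, acc.2 ++ [player])) (a, b)
        = (a ++ ps.filter pvIsNo, b ++ ps.filter (fun p => !(pvIsNo p))) by
    have := h players [] []
    simp only [List.nil_append] at this
    exact this
  intro ps
  induction ps with
  | nil => intro a b; simp
  | cons p t ih =>
      intro a b
      rw [List.foldl_cons]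
      by_cases hp : pvIsNo p = true
      · rw [if_pos hp, ih, List.filter_cons_of_pos hp,
          List.filter_cons_of_neg (by simp [hp])]
        simp
      · rw [if_neg hp, ih, List.filter_cons_of_neg hp,
          List.filter_cons_of_pos (by simp [Bool.not_eq_true] at hp ⊢; exact hp)]
        simp

theorem pvAloop (teams : List String) (hL : 0 < teams.length)
    (g : List (List (String × String))) (i : Nat) (hi : i < teams.length)
    (acc : List (List (String × String))) :
    g.foldl (pvAStep teams) ((i : Int), acc)
      = ((((i + g.length) % teams.length : Nat) : Int), acc ++ pvBuild teams i g) := by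
  induction g generalizing i acc with
  | nil => simp [pvBuild, Nat.mod_eq_of_lt hi]
  | cons p ps ih =>
      rw [List.foldl_cons]
      have hstep : pvAStep teams ((i : Int), acc) p
          = ((((i + 1) % teams.length : Nat) : Int), acc ++ [pvIns teams i p]) := by
        simp only [pvAStep, PySem.List.pyGet?_natCast, pvIns, Nat.mod_eq_of_lt hi]
        refine Prod.ext ?_ rfl
        show (if (i : Int) < (teams.length : Int) - 1 then (i : Int) + 1 else 0)
            = (((i + 1) % teams.length : Nat) : Int)
        by_cases hc : i + 1 < teams.length
        · rw [if_pos (by omega), Nat.mod_eq_of_lt hc]; push_cast; ring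
        · rw [if_neg (by omega)]
          have h0 : (i + 1) % teams.length = 0 := by
            have : i + 1 = teams.length := by omega
            simp [this]
          rw [h0]; simp
      rw [hstep, ih ((i + 1) % teams.length) (Nat.mod_lt _ hL) (acc ++ [pvIns teams i p])]
      have hmod : ((i + 1) % teams.length + ps.length) % teams.length
          = (i + (p :: ps).length) % teams.length := by
        rw [Nat.mod_add_mod]
        congr 1
        simp; omega
      rw [hmod, pvBuild_congr teams ps ((i + 1) % teams.length) (i + 1)
        (Nat.mod_mod_of_dvd _ (dvd_refl _))]
      simp [pvBuild]

-- === B side ===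
-- the insertion pass keeps the inexperienced players as a prefix:
theorem pvBloop (ps : List (List (String × String))) :
    ∀ (no yes : List (List (String × String))),
    ps.foldl pvBStep (no ++ yes, (no.length : Int))
      = ((no ++ ps.filter pvIsNo) ++ (yes ++ ps.filter (fun p => !(pvIsNo p))),
         ((no.length + (ps.filter pvIsNo).length : Nat) : Int)) := by
  induction ps with
  | nil => intro no yes; simp
  | cons p t ih =>
      intro no yes
      rw [List.foldl_cons]
      by_cases hp : pvIsNo p = true
      · have hins : pvBStep (no ++ yes, (no.length : Int)) p
            = ((no ++ [p]) ++ yes, ((no ++ [p]).length : Int)) := by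
          simp only [pvBStep, pvIsNo] at hp ⊢
          rw [if_pos hp, PySem.List.insert_natCast _ _ _ (by simp)]
          simp
        rw [hins, ih (no ++ [p]) yes]
        rw [List.filter_cons_of_pos hp, List.filter_cons_of_neg (by simp [hp])]
        refine Prod.ext (by simp) (by simp; omega)
      · have hins : pvBStep (no ++ yes, (no.length : Int)) p
            = (no ++ (yes ++ [p]), (no.length : Int)) := by
          simp only [pvBStep, pvIsNo] at hp ⊢
          rw [if_neg hp]
          simp
        rw [hins, ih no (yes ++ [p])]
        rw [List.filter_cons_of_neg hp,
          List.filter_cons_of_pos (by simp [Bool.not_eq_true] at hp ⊢; exact hp)]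
        simp

-- element k of teams * copies is teams[k % len(teams)]
theorem pvRep_getElem? (teams : List String) (c k : Nat) (hk : k < c * teams.length) :
    ((List.replicate c teams).flatten)[k]? = teams[k % teams.length]? := by
  induction c generalizing k with
  | zero => simp at hk
  | succ m ih =>
      have hL : 0 < teams.length := by
        rcases Nat.eq_zero_or_pos teams.length with h | h
        · rw [h] at hk; simp at hk
        · exact h
      rw [List.replicate_succ, List.flatten_cons]
      by_cases hkL : k < teams.length
      · rw [List.getElem?_append_left hkL, Nat.mod_eq_of_lt hkL]
      · have hge : teams.length ≤ k := Nat.le_of_not_lt hkL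
        rw [List.getElem?_append_right hge, ih (k - teams.length) (by
          have : (m + 1) * teams.length = teams.length + m * teams.length := by ring
          omega)]
        rw [Nat.mod_eq_sub_mod hge]

theorem pvRep_length (xs : List String) (n : Int) :
    (PySem.List.pyRepeat xs n).length = n.toNat * xs.length := by
  unfold PySem.List.pyRepeat
  simp [List.length_flatten, List.sum_replicate, smul_eq_mul]

theorem pvZipMap_eq_pvBuild (teams : List String) (hL : 0 < teams.length)
    (xs : List (List (String × String))) (c : Int)
    (hc : xs.length ≤ c.toNat * teams.length) :
    (xs.zip (PySem.List.pyRepeat teams c)).map pvTag = pvBuild teams 0 xs := by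
  have hrepLen : (PySem.List.pyRepeat teams c).length = c.toNat * teams.length :=
    pvRep_length teams c
  have hlen : ((xs.zip (PySem.List.pyRepeat teams c)).map pvTag).length = xs.length := by
    simp [List.length_zip, hrepLen]; omega
  apply List.ext_getElem
  · rw [hlen, pvBuild_length]
  · intro k hk1 hk2
    rw [pvBuild_length] at hk2
    have hkrep : k < (PySem.List.pyRepeat teams c).length := by omega
    have hrepk : (PySem.List.pyRepeat teams c)[k] = teams[k % teams.length]'(Nat.mod_lt _ hL) := by
      have h? : (PySem.List.pyRepeat teams c)[k]? = teams[k % teams.length]? := by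
        unfold PySem.List.pyRepeat
        exact pvRep_getElem? teams c.toNat k (by omega)
      rw [List.getElem?_eq_getElem hkrep, List.getElem?_eq_getElem (Nat.mod_lt _ hL)] at h?
      exact Option.some_injective _ h?
    rw [List.getElem_map, List.getElem_zip, pvBuild_getElem teams xs 0 k hk2]
    simp only [pvTag, pvIns, Nat.zero_add, hrepk,
      List.getElem?_eq_getElem (Nat.mod_lt k hL), Option.getD_some]

-- ===== VERDICT =====
theorem assign_players_spec : Claim_equal_assign_players := by
  intro players team_list _hdom hpre
  unfold Spec_assign_players
  unfold assign_players assign_players_alt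
  dsimp only
  rw [pvSortPlayers_eq]
  rw [PySem.List.foldl_append_singleton_eq_map]
  have hB := pvBloop players [] []
  simp only [List.nil_append, List.length_nil, Nat.cast_zero, Nat.zero_add] at hB
  rw [hB]
  simp only [List.nil_append, PySem.Dict.keys]
  set g1 := players.filter pvIsNo with hg1
  set g2 := players.filter (fun p => !(pvIsNo p)) with hg2
  set teams := team_list.map Prod.fst with hteams
  by_cases hp : players = []
  · subst hp
    simp [hg1, hg2]
  · have htl : team_list ≠ [] := by
      rcases hpre.2 with h | h
      · exact absurd h hp
      · exact h
    have hL : 0 < teams.length := by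
      rw [hteams, List.length_map]
      exact List.length_pos_of_ne_nil htl
    have hg12 : 0 < (g1 ++ g2).length := by
      rw [List.length_append, hg1, hg2]
      have := (List.filter_append_perm pvIsNo players).length_eq
      rw [List.length_append] at this
      have hpl : 0 < players.length := List.length_pos_of_ne_nil hp
      omega
    -- A side: two wrapped-counter loops = pvBuild over the concatenation
    have h0 : (0 : Int) = ((0 : Nat) : Int) := rfl
    rw [h0, pvAloop teams hL g1 0 hL []]
    rw [pvAloop teams hL g2 ((0 + g1.length) % teams.length) (Nat.mod_lt _ hL)]
    simp only [List.nil_append]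
    -- B side: the zip with the replicated team list = the same pvBuild
    have hne : (g1 ++ g2).isEmpty = false := by
      rw [List.isEmpty_eq_false_iff]
      intro h; rw [h] at hg12; simp at hg12
    rw [hne]
    simp only [Bool.false_eq_true, if_false]
    set n := (g1 ++ g2).length with hn
    set copies : Int := -PySem.Int.floordiv (-(n : Int)) (teams.length : Int) with hcopies
    have hceil : ((copies - 1) * teams.length < (n : Int)) ∧ ((n : Int) ≤ copies * teams.length) := by
      exact (PySem.Int.neg_floordiv_neg_eq_iff_of_pos (by exact_mod_cast hL)).mp hcopies.symm
    have hcnn : 0 < copies := by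
      rcases hceil with ⟨h1, h2⟩
      by_contra hcn
      rw [not_lt] at hcn
      have : copies * (teams.length : Int) ≤ 0 :=
        mul_nonpos_of_nonpos_of_nonneg hcn (by positivity)
      omega
    have hcnt : n ≤ copies.toNat * teams.length := by
      rcases hceil with ⟨h1, h2⟩
      have : (copies.toNat : Int) = copies := Int.toNat_of_nonneg (le_of_lt hcnn)
      have h3 : (n : Int) ≤ (copies.toNat : Int) * (teams.length : Int) := by rw [this]; exact h2
      exact_mod_cast h3
    rw [pvZipMap_eq_pvBuild teams hL (g1 ++ g2) copies hcnt]
    rw [pvBuild_append]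
    congr 1
    exact pvBuild_congr teams g2 _ _ (by simp [Nat.mod_mod_of_dvd])
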